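-- pv_equiv track=rewrite | github.com/anapaula14/Lim_3Dreconstruction | 01_temporalcalibration/01_temporalcalibration.py | replaceComas
-- ===== SOURCE A (Python) =====
-- def replaceComas(string):#csv
--     a=""
--     v=False
--     final=""
--     for i,d in enumerate(string): #recorre dos variables 0 "a"... 1 "b"
--         if d==" " or i==len(string)-1:
--             if v==True:
--                 final+=a+","
--                 a=""
--                 v=False
--             v=False
--         else:
--             a+=d
--             v=True
--     return final
-- ===== SOURCE B (Python) =====
-- def replaceComas(string):
--     # A never looks at the last character's value except to terminate, so it
--     # effectively tokenises string[:-1] on single spaces, dropping empty runs.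
--     return ''.join(t + ',' for t in string[:-1].split(' ') if t)
-- ===== Notes on version B (the rewrite author's own statement) =====
-- stated objective: simpler
-- what changed: B replaces A's char-by-char accumulator loop (partial token, pending flag, flush-on-space/last-index) with a one-line split-then-join: since A never emits the final character, B tokenises string[:-1] on single spaces, drops empty tokens and joins each token with a trailing comma; in CPython the C-level split/join also beats A's per-character string concatenation by a large constant factor.
import Mathlib
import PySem

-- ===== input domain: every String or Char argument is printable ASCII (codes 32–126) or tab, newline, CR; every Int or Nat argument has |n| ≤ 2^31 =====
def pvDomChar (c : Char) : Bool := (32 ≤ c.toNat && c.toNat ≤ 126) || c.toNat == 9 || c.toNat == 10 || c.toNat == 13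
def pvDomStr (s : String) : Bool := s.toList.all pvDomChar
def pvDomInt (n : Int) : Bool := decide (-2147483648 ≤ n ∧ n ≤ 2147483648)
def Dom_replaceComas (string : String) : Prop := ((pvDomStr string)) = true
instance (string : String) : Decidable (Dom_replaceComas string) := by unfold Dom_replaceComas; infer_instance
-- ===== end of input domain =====

-- B replaces A's char-by-char accumulator loop with a split-then-join over tokens
-- of string[:-1] (A never emits the last character); objective: simpler.

-- ===== PORT A =====
-- the for-loop over enumerate(string) as structural recursion on the remaining
-- characters, carrying the index i, the total length n and the state (a, v, final)
def replaceComasGo (n : Nat) (i : Nat) (l : List Char)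
    (a : List Char) (v : Bool) (final : List Char) : List Char :=
  match l with
  | [] => final
  | d :: rest =>
    if d == ' ' || i == n - 1 then
      if v then replaceComasGo n (i+1) rest [] false (final ++ a ++ [','])
      else replaceComasGo n (i+1) rest a false final
    else replaceComasGo n (i+1) rest (a ++ [d]) true final

def replaceComas (string : String) : String :=
  String.mk (replaceComasGo string.toList.length 0 string.toList [] false [])

-- ===== PORT B =====
-- ''.join(t + ',' for t in string[:-1].split(' ') if t)
def replaceComas_alt (string : String) : String :=
  String.mk
    ((((PySem.List.slice string.toList none (some (-1))).splitOn ' ').filter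
        (fun t => !t.isEmpty)).flatMap (fun t => t ++ [',']))

-- ===== PRECONDITION & SPEC =====
def Spec_replaceComas (string : String) (out : String) : Prop := out = replaceComas_alt string
instance (string : String) (out : String) : Decidable (Spec_replaceComas string out) := by unfold Spec_replaceComas; infer_instance

-- ===== CLAIM (what is proved, stated in full; the proofs are below) =====
def Claim_equal_replaceComas : Prop := ∀ (string : String), Dom_replaceComas string → Spec_replaceComas string (replaceComas string)

-- ===== LEMMAS AND PROOFS =====

-- the index-free body of A's loop: flush on a space, otherwise accumulate
def rcLoop : List Char → List Char × Bool × List Char → List Char × Bool × List Char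
  | [], st => st
  | d :: rest, (a, v, f) =>
    if d = ' ' then
      if v then rcLoop rest ([], false, f ++ a ++ [','])
      else rcLoop rest (a, false, f)
    else rcLoop rest (a ++ [d], true, f)

def rcFlush : List Char × Bool × List Char → List Char
  | (a, v, f) => if v then f ++ a ++ [','] else f

-- B's core on a list of characters
def rcB (l : List Char) : List Char :=
  ((l.splitOn ' ').filter (fun t => !t.isEmpty)).flatMap (fun t => t ++ [','])

-- A's indexed loop = index-free loop on all but the last character, then a final flush
theorem rcGo_eq_loop (l : List Char) : ∀ (i n : Nat) (a : List Char) (v : Bool)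
    (f : List Char), l ≠ [] → i + l.length = n →
    replaceComasGo n i l a v f = rcFlush (rcLoop l.dropLast (a, v, f)) := by
  induction l with
  | nil => intro _ _ _ _ _ h _; exact absurd rfl h
  | cons d rest ih =>
    intro i n a v f _ hn
    match rest, ih with
    | [], _ =>
      have hi : i = n - 1 := by simp at hn; omega
      rw [replaceComasGo]
      simp only [hi, beq_self_eq_true, Bool.or_true, if_true]
      by_cases hv : v <;> simp [hv, replaceComasGo, rcLoop, rcFlush]
    | e :: rest', ih =>
      have hi : ¬ (i = n - 1) := by simp at hn; omega
      have hn' : i + 1 + (e :: rest').length = n := by simp at hn ⊢; omega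
      rw [replaceComasGo]
      rw [List.dropLast_cons₂]
      by_cases hd : d = ' '
      · subst hd
        simp only [beq_self_eq_true, Bool.true_or, if_true, rcLoop]
        by_cases hv : v <;>
          simp only [hv, if_true, if_false, Bool.false_eq_true,
            ih _ _ _ _ _ (by simp) hn']
      · have hb : (d == ' ') = false := by simp [hd]
        simp only [hb, Bool.false_or]
        rw [if_neg (by simp [hi]), ih _ _ _ _ _ (by simp) hn']
        simp only [rcLoop, if_neg hd]

theorem splitOn_space_free (a : List Char) (ha : ' ' ∉ a) :
    a.splitOn ' ' = [a] := by
  induction a with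
  | nil => rfl
  | cons d rest ih =>
    have hd : ¬ (d = ' ') := fun h => ha (h ▸ List.mem_cons_self)
    have : rest.splitOn ' ' = [rest] := ih (fun h => ha (List.mem_cons_of_mem _ h))
    simp only [List.splitOn] at this ⊢
    rw [List.splitOnP_cons, this]
    simp [hd]

theorem splitOn_append_space (a rest : List Char) (ha : ' ' ∉ a) :
    (a ++ ' ' :: rest).splitOn ' ' = a :: rest.splitOn ' ' := by
  induction a with
  | nil => simp only [List.splitOn, List.nil_append]; rw [List.splitOnP_cons]; simp
  | cons d a' ih =>
    have hd : ¬ (d = ' ') := fun h => ha (h ▸ List.mem_cons_self)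
    have := ih (fun h => ha (List.mem_cons_of_mem _ h))
    simp only [List.splitOn] at this ⊢
    rw [List.cons_append, List.splitOnP_cons, this]
    simp [hd]

theorem rcB_token (a rest : List Char) (ha : ' ' ∉ a) :
    rcB (a ++ ' ' :: rest) =
      (if a.isEmpty then [] else a ++ [',']) ++ rcB rest := by
  unfold rcB
  rw [splitOn_append_space a rest ha]
  by_cases h : a = [] <;> simp [h]

-- the index-free loop followed by the final flush computes B's split-then-join
theorem rcLoop_eq_rcB (l : List Char) : ∀ (a f : List Char), ' ' ∉ a →
    rcFlush (rcLoop l (a, !a.isEmpty, f)) = f ++ rcB (a ++ l) := by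
  induction l with
  | nil =>
    intro a f ha
    simp only [rcLoop, rcFlush, List.append_nil]
    unfold rcB
    rw [splitOn_space_free a ha]
    by_cases h : a = [] <;> simp [h]
  | cons d rest ih =>
    intro a f ha
    by_cases hd : d = ' '
    · subst hd
      rw [rcB_token a rest ha]
      by_cases h : a = []
      · subst h
        simpa using ih [] f (by simp)
      · have hne : a.isEmpty = false := by simp [h]
        simp only [rcLoop, hne, Bool.not_false]
        have := ih [] (f ++ a ++ [',']) (by simp)
        simpa using this
    · have hv : (a ++ [d]).isEmpty = false := by simp
      simp only [rcLoop, if_neg hd]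
      have := ih (a ++ [d]) f (by
        intro h
        rcases List.mem_append.mp h with h' | h'
        · exact ha h'
        · simp at h'; exact hd h'.symm)
      rw [hv] at this
      simpa [List.append_assoc] using this

-- ===== VERDICT (by name: the statement is the Claim_ definition above) =====
theorem replaceComas_spec : Claim_equal_replaceComas := by
  intro s _
  unfold Spec_replaceComas replaceComas replaceComas_alt
  rw [PySem.List.slice_to_neg_one]
  rcases hl : s.toList with _ | ⟨d, rest⟩
  · rfl
  · rw [rcGo_eq_loop (d :: rest) 0 (d :: rest).length [] false [] (by simp) (by simp)]
    have := rcLoop_eq_rcB (d :: rest).dropLast [] [] (by simp)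
    simp only [List.isEmpty_nil, Bool.not_true, List.nil_append] at this
    rw [this]
    rfl
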